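-- pv_equiv track=rewrite | github.com/PepsiMonster/Diplom | prog_GPU/py/plots.py | baseline_for_dimension
-- ===== SOURCE A (Python) =====
-- from typing import Any, Iterable, Sequence
--
-- WORKLOAD_ORDER = [
--     "deterministic",
--     "erlang_8",
--     "erlang_4",
--     "erlang_2",
--     "exponential",
--     "hyperexp_2",
--     "hyperexp_heavy",
-- ]
--
-- ARRIVAL_ORDER = [
--     "poisson",
--     "erlang_4",
--     "erlang_2",
--     "hyperexp_2",
-- ]
--
-- def dimension_order(dimension: str) -> list[str]:
--     if dimension == "workload":
--         return WORKLOAD_ORDER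
--     if dimension == "arrival":
--         return ARRIVAL_ORDER
--     return []
--
-- def baseline_for_dimension(dimension: str, available_values: Sequence[str]) -> str | None:
--     preferred = "deterministic" if dimension == "workload" else "poisson"
--     if preferred in set(map(str, available_values)):
--         return preferred
--     ordered = [v for v in dimension_order(dimension) if v in set(map(str, available_values))]
--     if ordered:
--         return ordered[0]
--     return str(available_values[0]) if available_values else None
-- ===== SOURCE B (Python) =====
-- WORKLOAD_ORDER = [
--     "deterministic",
--     "erlang_8",
--     "erlang_4",
--     "erlang_2",
--     "exponential",
--     "hyperexp_2",
--     "hyperexp_heavy",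
-- ]
--
-- ARRIVAL_ORDER = [
--     "poisson",
--     "erlang_4",
--     "erlang_2",
--     "hyperexp_2",
-- ]
--
-- def dimension_order(dimension):
--     if dimension == "workload":
--         return WORKLOAD_ORDER
--     if dimension == "arrival":
--         return ARRIVAL_ORDER
--     return []
--
-- def baseline_for_dimension(dimension, available_values):
--     preferred = "deterministic" if dimension == "workload" else "poisson"
--     names = [preferred, *dimension_order(dimension)]
--     rank = {name: i for i, name in enumerate(names)}
--     if not available_values:
--         return None
--     return str(min(available_values, key=lambda v: rank.get(str(v), len(names))))
-- ===== Notes on version B (the rewrite author's own statement) =====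
-- stated objective: alternative
-- what changed: Replaces A's set-membership test for the preferred value plus a filtered comprehension over the dimension order with a rank table built once from [preferred, *dimension_order] and a single min-by-rank scan over available_values (unranked values fall back to a sentinel rank, ties keep the first element).
import Mathlib
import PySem

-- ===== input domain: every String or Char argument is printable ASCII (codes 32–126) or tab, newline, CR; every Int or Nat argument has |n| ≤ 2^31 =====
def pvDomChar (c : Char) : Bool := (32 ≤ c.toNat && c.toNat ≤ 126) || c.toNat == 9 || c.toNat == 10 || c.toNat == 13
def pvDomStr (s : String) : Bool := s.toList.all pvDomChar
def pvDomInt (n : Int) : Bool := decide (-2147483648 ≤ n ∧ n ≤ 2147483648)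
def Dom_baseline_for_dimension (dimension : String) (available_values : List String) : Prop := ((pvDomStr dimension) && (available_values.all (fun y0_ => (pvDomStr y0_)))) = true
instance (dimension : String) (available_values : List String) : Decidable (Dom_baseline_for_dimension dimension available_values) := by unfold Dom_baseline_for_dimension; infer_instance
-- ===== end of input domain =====

-- B replaces A's membership-test + filtered-comprehension + indexing with a rank table built
-- once and a single min-by-rank scan over available_values (objective: alternative decomposition).

-- ===== PORT A =====
def WORKLOAD_ORDER : List String :=
  ["deterministic", "erlang_8", "erlang_4", "erlang_2", "exponential", "hyperexp_2", "hyperexp_heavy"]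

def ARRIVAL_ORDER : List String :=
  ["poisson", "erlang_4", "erlang_2", "hyperexp_2"]

def dimensionOrder (dimension : String) : List String :=
  if dimension == "workload" then WORKLOAD_ORDER
  else if dimension == "arrival" then ARRIVAL_ORDER
  else []

def baseline_for_dimension (dimension : String) (available_values : List String) : Option String :=
  let preferred := if dimension == "workload" then "deterministic" else "poisson"
  -- set(map(str, available_values)); str is the identity on the str elements
  let avset : PySem.Set String := PySem.Set.ofList (available_values.map (fun v => v))
  if preferred ∈ avset then some preferred
  else
    let ordered := (dimensionOrder dimension).filter (fun v => decide (v ∈ avset))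
    match ordered with
    | v :: _ => some v
    | [] =>
      match available_values with
      | v :: _ => some v
      | [] => none

-- ===== PORT B =====
def baseline_for_dimension_alt (dimension : String) (available_values : List String) : Option String :=
  let preferred := if dimension == "workload" then "deterministic" else "poisson"
  let names := preferred :: dimensionOrder dimension
  -- rank = {name: i for i, name in enumerate(names)}
  let rank : PySem.Dict String Int :=
    (PySem.List.enumerate names).foldl (fun d p => d.insert p.2 p.1) PySem.Dict.empty
  match available_values with
  | [] => none
  | _ :: _ =>
    -- min(available_values, key=lambda v: rank.get(str(v), len(names)))
    PySem.List.min? available_values (fun v => rank.getD v (names.length : Int))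

-- ===== PRECONDITION & SPEC =====
def Spec_baseline_for_dimension (dimension : String) (available_values : List String) (out : Option String) : Prop := out = baseline_for_dimension_alt dimension available_values
instance (dimension : String) (available_values : List String) (out : Option String) : Decidable (Spec_baseline_for_dimension dimension available_values out) := by unfold Spec_baseline_for_dimension; infer_instance

-- ===== CLAIM (what is proved, stated in full; the proofs are below) =====
def Claim_equal_baseline_for_dimension : Prop := ∀ (dimension : String) (available_values : List String), Dom_baseline_for_dimension dimension available_values → Spec_baseline_for_dimension dimension available_values (baseline_for_dimension dimension available_values)

-- ===== LEMMAS AND PROOFS =====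

-- "first candidate present in av, else first element of av" — the shape A computes
def pvChain (cs : List String) (av : List String) : Option String :=
  match cs.find? (fun c => decide (c ∈ av)) with
  | some c => some c
  | none => av.head?

-- one step of Python's min-with-key loop (keeps the earlier element on ties)
def pvStep (k : String → Int) (m y : String) : String := if k y < k m then y else m

lemma min?_cons_eq_foldl (k : String → Int) (x : String) (t : List String) :
    PySem.List.min? (x :: t) k = some (t.foldl (pvStep k) x) := by
  show List.foldl _ (some x) t = _
  induction t generalizing x with
  | nil => rfl
  | cons y t ih =>
    simp only [List.foldl_cons]
    rw [show (if k y < k x then some y else some x) = some (pvStep k x y) from (apply_ite some _ _ _).symm]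
    exact ih (pvStep k x y)

lemma chain_step (cs : List String) (k : String → Int) (L : Int)
    (hord : cs.Pairwise (fun a b => k a < k b))
    (hout : ∀ v, v ∉ cs → k v = L)
    (hcand : ∀ c ∈ cs, k c < L)
    (x y : String) (t : List String) :
    pvChain cs (x :: y :: t) = pvChain cs (pvStep k x y :: t) := by
  have hgle : k (pvStep k x y) ≤ k x ∧ k (pvStep k x y) ≤ k y := by
    unfold pvStep; split_ifs with h <;> constructor <;> omega
  have hgxy : pvStep k x y = x ∨ pvStep k x y = y := by
    unfold pvStep; split_ifs <;> simp
  cases hbig : cs.find? (fun c => decide (c ∈ x :: y :: t)) with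
  | none =>
    have hall := List.find?_eq_none.mp hbig
    have hx : x ∉ cs := fun h => by have := hall x h; simp at this
    have hy : y ∉ cs := fun h => by have := hall y h; simp at this
    have hg : pvStep k x y = x := by
      unfold pvStep; rw [hout x hx, hout y hy]; simp
    have hsmall : cs.find? (fun c => decide (c ∈ pvStep k x y :: t)) = none := by
      rw [List.find?_eq_none]
      intro c hc
      have hcbig := hall c hc
      simp only [decide_eq_true_eq, List.mem_cons] at hcbig ⊢
      rw [hg]
      rintro (h | h)
      · exact hcbig (Or.inl h)
      · exact hcbig (Or.inr (Or.inr h))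
    unfold pvChain
    rw [hbig, hsmall, hg]
    simp
  | some c =>
    obtain ⟨hpc, as, bs, hcs, has⟩ := List.find?_eq_some_iff_append.mp hbig
    have hcin : c ∈ cs := by rw [hcs]; simp
    by_cases hsm : c ∈ pvStep k x y :: t
    · have hsmall : cs.find? (fun c' => decide (c' ∈ pvStep k x y :: t)) = some c := by
        rw [List.find?_eq_some_iff_append]
        refine ⟨by simpa using hsm, as, bs, hcs, ?_⟩
        intro a ha
        have h2 := has a ha
        simp only [Bool.not_eq_eq_eq_not, Bool.not_true, decide_eq_false_iff_not,
          List.mem_cons, not_or] at h2 ⊢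
        refine ⟨?_, h2.2.2⟩
        rcases hgxy with hg | hg <;> rw [hg]
        · exact h2.1
        · exact h2.2.1
      unfold pvChain; rw [hbig, hsmall]
    · exfalso
      simp only [List.mem_cons, not_or] at hsm
      simp only [decide_eq_true_eq, List.mem_cons] at hpc
      have hcxy : c = x ∨ c = y := by
        rcases hpc with h | h | h
        · exact Or.inl h
        · exact Or.inr h
        · exact absurd h hsm.2
      have hkgc : k (pvStep k x y) ≤ k c := by
        rcases hcxy with h | h <;> rw [h]
        · exact hgle.1
        · exact hgle.2
      have hkcL : k c < L := hcand c hcin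
      have hgcs : pvStep k x y ∈ cs := by
        by_contra hng
        have := hout _ hng
        omega
      rw [hcs] at hgcs
      rcases List.mem_append.mp hgcs with hgas | hgcb
      · have := has _ hgas
        simp only [Bool.not_eq_eq_eq_not, Bool.not_true, decide_eq_false_iff_not,
          List.mem_cons, not_or] at this
        rcases hgxy with hg | hg
        · exact this.1 hg
        · exact this.2.1 hg
      · rcases List.mem_cons.mp hgcb with hg | hg
        · exact hsm.1 hg.symm
        · rw [hcs] at hord
          have hp := (List.pairwise_append.mp hord).2.1
          have := (List.pairwise_cons.mp hp).1 _ hg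
          omega

lemma foldl_min_eq_chain (cs : List String) (k : String → Int) (L : Int)
    (hord : cs.Pairwise (fun a b => k a < k b))
    (hout : ∀ v, v ∉ cs → k v = L)
    (hcand : ∀ c ∈ cs, k c < L) :
    ∀ (t : List String) (x : String), some (t.foldl (pvStep k) x) = pvChain cs (x :: t) := by
  intro t
  induction t with
  | nil =>
    intro x
    unfold pvChain
    cases hfind : cs.find? (fun c => decide (c ∈ [x])) with
    | none => rfl
    | some c =>
      have := List.find?_some hfind
      simp at this
      simp [this]
  | cons y t ih =>
    intro x
    rw [List.foldl_cons, ih (pvStep k x y), ← chain_step cs k L hord hout hcand]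


-- rank.get(v, L) defaults for names never inserted
lemma getD_rank_not_mem (names : List String) (v : String) (hv : v ∉ names) (L : Int) :
    ((PySem.List.enumerate names).foldl (fun d p => d.insert p.2 p.1)
      (PySem.Dict.empty : PySem.Dict String Int)).getD v L = L := by
  have key : ∀ (ns : List String) (s : Int) (d : PySem.Dict String Int), v ∉ ns →
      ((PySem.List.enumerate ns s).foldl (fun d p => d.insert p.2 p.1) d).get? v = d.get? v := by
    intro ns
    induction ns with
    | nil => intro s d _; rfl
    | cons n ns ih =>
      intro s d hv
      rw [PySem.List.enumerate_cons, List.foldl_cons]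
      rw [ih (s + 1) _ (fun h => hv (List.mem_cons_of_mem _ h))]
      exact PySem.Dict.get?_insert_of_ne _ _ (fun h => hv (h ▸ List.mem_cons_self))
  unfold PySem.Dict.getD
  rw [key names 0 _ hv]
  rfl

-- A's if/filter shape equals pvChain when the preferred value heads the order list
lemma Ashape_cons (p : String) (rest av : List String) :
    (if p ∈ av then some p
     else match (p :: rest).filter (fun v => decide (v ∈ av)) with
          | v :: _ => some v
          | [] => match av with | v :: _ => some v | [] => none) = pvChain (p :: rest) av := by
  by_cases hp : p ∈ av
  · simp [pvChain, hp, List.find?_cons_of_pos]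
  · rw [if_neg hp]
    unfold pvChain
    rw [← List.head?_filter]
    cases hq : (p :: rest).filter (fun v => decide (v ∈ av)) with
    | cons v _ => simp
    | nil => cases av <;> simp

-- the chain as a function of av equals B's guarded min loop
lemma chain_eq_minloop (cs : List String) (k : String → Int) (L : Int)
    (hord : cs.Pairwise (fun a b => k a < k b))
    (hout : ∀ v, v ∉ cs → k v = L)
    (hcand : ∀ c ∈ cs, k c < L) (av : List String) :
    pvChain cs av = (match av with
      | [] => none
      | x :: t => some (t.foldl (pvStep k) x)) := by
  cases av with
  | nil =>
    unfold pvChain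
    rw [List.find?_eq_none.mpr (by intro c _; simp)]
    rfl
  | cons x t => exact (foldl_min_eq_chain cs k L hord hout hcand t x).symm


-- B's port unfolded: the guarded min loop with its concrete key
lemma Balt_eq (dimension : String) (av : List String) :
    baseline_for_dimension_alt dimension av =
      (match av with
       | [] => none
       | x :: t => some (t.foldl (pvStep (fun v =>
           ((PySem.List.enumerate ((if dimension == "workload" then "deterministic" else "poisson") :: dimensionOrder dimension)).foldl
             (fun d p => d.insert p.2 p.1) PySem.Dict.empty).getD v
           ((((if dimension == "workload" then "deterministic" else "poisson") :: dimensionOrder dimension)).length : Int))) x)) := by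
  unfold baseline_for_dimension_alt
  cases av with
  | nil => rfl
  | cons x t => exact min?_cons_eq_foldl _ x t

-- A's else branch with an empty order list
lemma Ashape_nil (p : String) (av : List String) :
    (if p ∈ av then some p
     else match ([] : List String).filter (fun v => decide (v ∈ av)) with
          | v :: _ => some v
          | [] => match av with | v :: _ => some v | [] => none) = pvChain [p] av := by
  by_cases hp : p ∈ av
  · simp [pvChain, hp]
  · unfold pvChain
    rw [List.find?_singleton]
    simp only [decide_eq_true_eq, hp, ite_false]
    rw [List.filter_nil]
    cases av <;> rfl

-- ===== VERDICT (by name: the statement is the Claim_ definition above) =====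
theorem baseline_for_dimension_spec : Claim_equal_baseline_for_dimension := by
  intro dimension av _
  unfold Spec_baseline_for_dimension
  rw [Balt_eq]
  by_cases h1 : dimension = "workload"
  · subst h1
    have hA : baseline_for_dimension "workload" av = pvChain WORKLOAD_ORDER av := by
      unfold baseline_for_dimension dimensionOrder
      simp only [PySem.Set.mem_ofList, List.map_id', String.reduceBEq, if_true]
      exact Ashape_cons "deterministic"
        ["erlang_8", "erlang_4", "erlang_2", "exponential", "hyperexp_2", "hyperexp_heavy"] av
    rw [hA]
    refine chain_eq_minloop WORKLOAD_ORDER _ 8 ?_ ?_ ?_ av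
    · decide
    · intro v hv
      refine getD_rank_not_mem _ v ?_ 8
      simp only [WORKLOAD_ORDER, List.mem_cons, not_or] at hv ⊢
      simp only [dimensionOrder, String.reduceBEq, if_true, WORKLOAD_ORDER, List.mem_cons, not_or]
      tauto
    · decide
  · by_cases h2 : dimension = "arrival"
    · subst h2
      have hA : baseline_for_dimension "arrival" av = pvChain ARRIVAL_ORDER av := by
        unfold baseline_for_dimension dimensionOrder
        simp only [PySem.Set.mem_ofList, List.map_id', String.reduceBEq, if_true, if_false,
          Bool.false_eq_true]
        exact Ashape_cons "poisson" ["erlang_4", "erlang_2", "hyperexp_2"] av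
      rw [hA]
      refine chain_eq_minloop ARRIVAL_ORDER _ 5 ?_ ?_ ?_ av
      · decide
      · intro v hv
        refine getD_rank_not_mem _ v ?_ 5
        simp only [ARRIVAL_ORDER, List.mem_cons, not_or] at hv
        simp only [dimensionOrder, String.reduceBEq, if_true, if_false, Bool.false_eq_true,
          ARRIVAL_ORDER, List.mem_cons, not_or]
        tauto
      · decide
    · have e1 : (dimension == "workload") = false := beq_eq_false_iff_ne.mpr h1
      have e2 : (dimension == "arrival") = false := beq_eq_false_iff_ne.mpr h2
      have hA : baseline_for_dimension dimension av = pvChain ["poisson"] av := by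
        unfold baseline_for_dimension dimensionOrder
        simp only [e1, e2, Bool.false_eq_true, ite_false, PySem.Set.mem_ofList, List.map_id']
        exact Ashape_nil "poisson" av
      rw [hA]
      have hdo : dimensionOrder dimension = [] := by
        unfold dimensionOrder; rw [e1, e2]; rfl
      simp only [e1, Bool.false_eq_true, ite_false, hdo]
      refine chain_eq_minloop ["poisson"] _ 1 ?_ ?_ ?_ av
      · decide
      · intro v hv
        exact getD_rank_not_mem _ v hv 1
      · decide
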